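-- pv_equiv track=rewrite | github.com/avi-pathak/100-Days-Code-Challenge | 100DayCode/Day57/Ques1.py | orangecap
-- ===== SOURCE A (Python) =====
-- def orangecap(d):
--   max= 0
--   d1 = {}
--   for i in d.keys():
--     for j,k in d[i].items():
--       if k > max:
--         max  =  k
--         d1.clear()
--         d1[j] = k;
--   for i in set(d1.items()):
--        return i
-- ===== SOURCE B (Python) =====
-- def orangecap(d):
--     items = [(k, v) for sub in d.values() for k, v in sub.items()]
--     ranked = sorted(items, key=lambda kv: kv[1], reverse=True)
--     if ranked and ranked[0][1] > 0:
--         return ranked[0]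
--     return None
-- ===== Notes on version B (the rewrite author's own statement) =====
-- stated objective: alternative
-- what changed: Replaced A's single-pass running-max loop over a clear-and-refill one-entry dict by a sort-then-pick algorithm: flatten all (key, value) pairs, stably sort them by value descending, take the head, and apply the >0 gate once; stability of sorted preserves A's first-occurrence tie-break.
-- outside the precondition, e.g. on orangecap({'a': {'x': -1}}): A returns None, B returns None
import Mathlib
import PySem

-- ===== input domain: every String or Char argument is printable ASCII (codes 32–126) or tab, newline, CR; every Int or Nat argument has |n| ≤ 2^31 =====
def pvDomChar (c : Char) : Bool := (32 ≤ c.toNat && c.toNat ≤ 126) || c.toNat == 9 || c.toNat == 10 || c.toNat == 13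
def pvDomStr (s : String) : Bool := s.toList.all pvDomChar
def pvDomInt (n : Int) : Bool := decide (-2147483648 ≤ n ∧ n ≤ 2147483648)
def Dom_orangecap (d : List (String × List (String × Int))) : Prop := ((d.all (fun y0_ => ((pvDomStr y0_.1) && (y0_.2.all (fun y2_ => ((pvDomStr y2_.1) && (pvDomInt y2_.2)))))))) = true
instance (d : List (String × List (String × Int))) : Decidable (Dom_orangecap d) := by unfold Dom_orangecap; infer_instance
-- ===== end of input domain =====

-- B replaces A's running-max loop over a clear-and-refill one-entry dict by a sort-then-pick
-- algorithm (flatten all pairs, stable sort by value descending, take the head, gate > 0): alternative, O(n log n).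


-- ===== PORT A =====
-- 'max' starts at 0; d1 is cleared and refilled with the single current leader, so it is a
-- one-entry PySem.Dict; the final 'for i in set(d1.items()): return i' takes the head of the set.
def orangecap (d : List (String × List (String × Int))) : String × Int :=
  let s := d.foldl
    (fun s p => p.2.foldl
      (fun s kv => if s.1 < kv.2 then (kv.2, (PySem.Dict.empty : PySem.Dict String Int).insert kv.1 kv.2) else s) s)
    ((0 : Int), (PySem.Dict.empty : PySem.Dict String Int))
  match PySem.Set.ofList s.2.items with
  | i :: _ => i
  | [] => ("", 0)   -- the loop body never runs: Python A returns None here (excluded by Pre_)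

-- ===== PORT B =====
def orangecap_alt (d : List (String × List (String × Int))) : String × Int :=
  let items := d.flatMap (fun p => p.2)
  match PySem.List.sorted items (fun kv => kv.2) true with
  | best :: _ => if best.2 > 0 then best else ("", 0)   -- Python B returns None in the else (excluded by Pre_)
  | [] => ("", 0)                                       -- Python B returns None here (excluded by Pre_)

-- ===== PRECONDITION & SPEC =====
-- Pre_ excludes exactly the inputs with no positive value, on which both Pythons return None,
-- which is not a value of the declared tuple return type.
def Pre_orangecap (d : List (String × List (String × Int))) : Prop :=
  ((d.flatMap (fun p => p.2)).any (fun kv => 0 < kv.2)) = true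
instance (d : List (String × List (String × Int))) : Decidable (Pre_orangecap d) := by unfold Pre_orangecap; infer_instance
def pvWitness_orangecap : (List (String × List (String × Int))) := [("a", [("x", 1)])]
def Spec_orangecap (d : List (String × List (String × Int))) (out : String × Int) : Prop := out = orangecap_alt d
instance (d : List (String × List (String × Int))) (out : String × Int) : Decidable (Spec_orangecap d out) := by unfold Spec_orangecap; infer_instance

-- ===== CLAIM (what is proved, stated in full; the proofs are below) =====
def Claim_equal_orangecap : Prop := ∀ (d : List (String × List (String × Int))), Dom_orangecap d → Pre_orangecap d → Spec_orangecap d (orangecap d)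

-- ===== LEMMAS AND PROOFS =====

-- first maximal-by-value element of b :: t, plain fold form
def bestOf (b : String × Int) (t : List (String × Int)) : String × Int :=
  t.foldl (fun m x => if m.2 < x.2 then x else m) b

-- A's loop step, named for the proofs
def stepA (s : Int × PySem.Dict String Int) (kv : String × Int) : Int × PySem.Dict String Int :=
  if s.1 < kv.2 then (kv.2, (PySem.Dict.empty : PySem.Dict String Int).insert kv.1 kv.2) else s

-- A's fold from a state of the invariant shape keeps the shape, with bestOf advancing
lemma loopA (t : List (String × Int)) : ∀ (b : String × Int) (m : Int) (s : PySem.Dict String Int),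
    t.foldl stepA (if m < b.2 then (b.2, (PySem.Dict.empty : PySem.Dict String Int).insert b.1 b.2) else (m, s))
    = (if m < (bestOf b t).2
        then ((bestOf b t).2, (PySem.Dict.empty : PySem.Dict String Int).insert (bestOf b t).1 (bestOf b t).2)
        else (m, s)) := by
  induction t with
  | nil => intro b m s; simp [bestOf]
  | cons a t ih =>
    intro b m s
    have step : stepA (if m < b.2 then (b.2, (PySem.Dict.empty : PySem.Dict String Int).insert b.1 b.2) else (m, s)) a
        = (if m < (if b.2 < a.2 then a else b).2
            then ((if b.2 < a.2 then a else b).2,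
                  (PySem.Dict.empty : PySem.Dict String Int).insert (if b.2 < a.2 then a else b).1 (if b.2 < a.2 then a else b).2)
            else (m, s)) := by
      by_cases h1 : m < b.2 <;> by_cases h2 : b.2 < a.2 <;> simp [stepA, h1, h2] <;> omega
    rw [List.foldl_cons, step, ih]
    simp [bestOf]

-- the head of the insertBy fold (= B's stable reverse sort) is the first maximal element
lemma head_foldl_insertBy (t : List (String × Int)) : ∀ (h : String × Int) (r : List (String × Int)),
    (t.foldl (fun acc a => PySem.List.insertBy (fun a b => decide (b.2 < a.2)) a acc) (h :: r)).head?
      = some (bestOf h t) := by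
  induction t with
  | nil => intro h r; simp [bestOf]
  | cons a t ih =>
    intro h r
    rw [List.foldl_cons]
    by_cases hc : h.2 < a.2
    · simp only [PySem.List.insertBy, hc, decide_true, if_true]
      rw [ih a (h :: r)]
      simp [bestOf, hc]
    · simp only [PySem.List.insertBy, hc, decide_false, Bool.false_eq_true, if_false]
      rw [ih h (PySem.List.insertBy (fun a b => decide (b.2 < a.2)) a r)]
      simp [bestOf, hc]

lemma sorted_rev_head (x : String × Int) (t : List (String × Int)) :
    (PySem.List.sorted (x :: t) (fun kv => kv.2) true).head? = some (bestOf x t) := by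
  rw [PySem.List.sorted_rev_eq_foldl_insertBy]
  rw [List.foldl_cons]
  exact head_foldl_insertBy t x []

-- bestOf dominates every element of the list
lemma bestOf_ge_base (t : List (String × Int)) : ∀ (b : String × Int), b.2 ≤ (bestOf b t).2 := by
  induction t with
  | nil => intro b; simp [bestOf]
  | cons a t ih =>
    intro b
    have hstep : bestOf b (a :: t) = bestOf (if b.2 < a.2 then a else b) t := by simp [bestOf]
    have := ih (if b.2 < a.2 then a else b)
    rw [hstep]
    by_cases hc : b.2 < a.2 <;> simp [hc] at this ⊢ <;> omega

lemma bestOf_isMax (t : List (String × Int)) : ∀ (b : String × Int),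
    ∀ y ∈ b :: t, y.2 ≤ (bestOf b t).2 := by
  induction t with
  | nil => intro b y hy; simp at hy; simp [bestOf, hy]
  | cons a t ih =>
    intro b y hy
    have hstep : bestOf b (a :: t) = bestOf (if b.2 < a.2 then a else b) t := by simp [bestOf]
    rw [hstep]
    have hbase := bestOf_ge_base t (if b.2 < a.2 then a else b)
    rcases List.mem_cons.mp hy with hy | hy
    · subst hy
      by_cases hc : y.2 < a.2 <;> simp [hc] at hbase ⊢ <;> omega
    · rcases List.mem_cons.mp hy with hy | hy
      · subst hy
        by_cases hc : b.2 < y.2 <;> simp [hc] at hbase ⊢ <;> omega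
      · exact ih (if b.2 < a.2 then a else b) y (List.mem_cons_of_mem _ hy)

-- ===== VERDICT (by name: the statement is the Claim_ definition above) =====
theorem orangecap_spec : Claim_equal_orangecap := by
  intro d _dom pre
  unfold Spec_orangecap orangecap orangecap_alt
  rw [show (fun (s : Int × PySem.Dict String Int) (kv : String × Int) =>
      if s.1 < kv.2 then (kv.2, (PySem.Dict.empty : PySem.Dict String Int).insert kv.1 kv.2) else s) = stepA from rfl]
  have hflat : d.foldl (fun s p => p.2.foldl stepA s) ((0 : Int), (PySem.Dict.empty : PySem.Dict String Int))
      = (d.flatMap (fun p => p.2)).foldl stepA ((0 : Int), (PySem.Dict.empty : PySem.Dict String Int)) := by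
    rw [List.foldl_flatMap]
  unfold Pre_orangecap at pre
  rcases hcons : d.flatMap (fun p => p.2) with _ | ⟨x, t⟩
  · rw [hcons] at pre; simp at pre
  · rw [hcons] at pre
    set c := bestOf x t with hc
    have hpos : 0 < c.2 := by
      obtain ⟨y, hy, hy2⟩ := List.any_eq_true.mp pre
      have hle := bestOf_isMax t x y hy
      rw [← hc] at hle
      simp only [decide_eq_true_eq] at hy2
      omega
    have hA : (x :: t).foldl stepA ((0 : Int), (PySem.Dict.empty : PySem.Dict String Int))
        = (c.2, (PySem.Dict.empty : PySem.Dict String Int).insert c.1 c.2) := by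
      rw [List.foldl_cons]
      have h0 : stepA ((0 : Int), (PySem.Dict.empty : PySem.Dict String Int)) x
          = (if (0:Int) < x.2 then (x.2, (PySem.Dict.empty : PySem.Dict String Int).insert x.1 x.2)
             else ((0:Int), (PySem.Dict.empty : PySem.Dict String Int))) := rfl
      rw [h0, loopA t x 0 PySem.Dict.empty]
      simp [← hc, hpos]
    have hhead := sorted_rev_head x t
    rcases hs : PySem.List.sorted (x :: t) (fun kv => kv.2) true with _ | ⟨b, bs⟩
    · rw [hs] at hhead; simp at hhead
    · rw [hs] at hhead
      simp only [List.head?] at hhead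
      have hb : b = c := by injection hhead
      simp only [hflat, hcons, hA, hs, hb]
      simp [PySem.Dict.insert, PySem.Dict.empty, PySem.Set.ofList, PySem.Set.add, hpos]
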